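-- pv_equiv track=rewrite | github.com/DIABLOSER/AndroidExplorer | app.py | _reverse_mapping_safe
-- ===== SOURCE A (Python) =====
-- from collections import OrderedDict
--
-- def _reverse_mapping_safe(source):
--     """将映射 old->new 反转为 new->old，重复键会被跳过"""
--     reversed_map = OrderedDict()
--     conflict_count = 0
--     for old_name, new_name in source.items():
--         if new_name in reversed_map and reversed_map[new_name] != old_name:
--             conflict_count += 1
--             continue
--         reversed_map[new_name] = old_name
--     return reversed_map, conflict_count
-- ===== SOURCE B (Python) =====
-- from collections import OrderedDict
--
-- def _reverse_mapping_safe(source):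
--     """将映射 old->new 反转为 new->old，重复键会被跳过"""
--     reversed_map = OrderedDict()
--     for old_name, new_name in source.items():
--         reversed_map.setdefault(new_name, old_name)
--     conflict_count = sum(1 for old_name, new_name in source.items()
--                          if reversed_map[new_name] != old_name)
--     return reversed_map, conflict_count
-- ===== Notes on version B (the rewrite author's own statement) =====
-- stated objective: simpler
-- what changed: Replaces A's single intertwined loop (membership test, conditional skip-and-count, conditional insert) by two plain passes: a setdefault pass that builds the first-occurrence reversed map, then a generator-sum pass counting entries whose stored old_name differs.
import Mathlib
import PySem

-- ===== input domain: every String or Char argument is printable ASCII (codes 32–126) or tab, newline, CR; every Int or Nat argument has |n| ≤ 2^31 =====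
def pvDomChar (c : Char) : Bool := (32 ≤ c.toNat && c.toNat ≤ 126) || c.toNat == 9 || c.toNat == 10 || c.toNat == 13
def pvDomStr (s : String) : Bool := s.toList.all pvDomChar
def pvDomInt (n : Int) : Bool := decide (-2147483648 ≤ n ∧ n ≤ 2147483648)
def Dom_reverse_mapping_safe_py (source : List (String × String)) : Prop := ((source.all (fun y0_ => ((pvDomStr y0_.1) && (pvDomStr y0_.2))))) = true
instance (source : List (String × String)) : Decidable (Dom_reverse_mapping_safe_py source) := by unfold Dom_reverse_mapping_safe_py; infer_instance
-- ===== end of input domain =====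

-- B replaces A's single intertwined loop by two plain passes (setdefault build, then a
-- counting pass); objective: simpler. Equivalence of return values is proved on all inputs.

-- ===== PORT A =====
-- literal transliteration of A's loop: one pass, membership test + conflict skip + insert
def reverse_mapping_safe_py (source : List (String × String)) : (List (String × String)) × Int :=
  let st := source.foldl
    (fun (st : PySem.Dict String String × Int) p =>
      match st.1.get? p.2 with
      | some v => if v ≠ p.1 then (st.1, st.2 + 1) else (st.1.insert p.2 p.1, st.2)
      | none => (st.1.insert p.2 p.1, st.2))
    ((PySem.Dict.empty : PySem.Dict String String), 0)
  (st.1.items, st.2)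

-- ===== PORT B =====
-- pass 1: reversed_map.setdefault(new, old); pass 2: sum of mismatches.
-- reversed_map[new_name] is ported as get? = some old_name: after pass 1 every new_name
-- occurring in source is a key of the map, so the Python lookup never raises and the
-- comparison 'reversed_map[new_name] != old_name' is exactly 'get? p.2 ≠ some p.1'.
def reverse_mapping_safe_py_alt (source : List (String × String)) : (List (String × String)) × Int :=
  let d := source.foldl (fun (d : PySem.Dict String String) p => d.setdefault p.2 p.1) PySem.Dict.empty
  let c := source.foldl (fun (c : Int) p => if d.get? p.2 = some p.1 then c else c + 1) 0
  (d.items, c)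

-- ===== PRECONDITION & SPEC =====
def Spec_reverse_mapping_safe_py (source : List (String × String)) (out : (List (String × String)) × Int) : Prop := out = reverse_mapping_safe_py_alt source
instance (source : List (String × String)) (out : (List (String × String)) × Int) : Decidable (Spec_reverse_mapping_safe_py source out) := by unfold Spec_reverse_mapping_safe_py; infer_instance

-- ===== CLAIM (what is proved, stated in full; the proofs are below) =====
def Claim_equal_reverse_mapping_safe_py : Prop := ∀ (source : List (String × String)), Dom_reverse_mapping_safe_py source → Spec_reverse_mapping_safe_py source (reverse_mapping_safe_py source)

-- ===== LEMMAS AND PROOFS =====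

-- first old_name paired with key k in l (what the setdefault pass stores for k)
def pvFirstOld (l : List (String × String)) (k : String) : Option String :=
  (l.find? (fun q => q.2 == k)).map (·.1)

theorem pvFirstOld_cons (p : String × String) (t : List (String × String)) (k : String) :
    pvFirstOld (p :: t) k = if p.2 = k then some p.1 else pvFirstOld t k := by
  unfold pvFirstOld
  rcases eq_or_ne p.2 k with h | h
  · rw [List.find?_cons_of_pos (by simp [h])]; simp [h]
  · rw [List.find?_cons_of_neg (by simp [h])]; simp [h]

-- inserting the value already stored at k leaves the dict unchanged
theorem pvInsert_eq_self (d : PySem.Dict String String) (k v : String)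
    (hnd : d.keys.Nodup) (h : d.get? k = some v) : d.insert k v = d := by
  have hc : d.contains k = true := by
    rw [PySem.Dict.contains_eq_isSome_get?, h]; rfl
  apply PySem.Dict.ext
  rw [PySem.Dict.items_insert_of_contains _ _ hc]
  have hid : ∀ p ∈ d.items, (if p.1 == k then (k, v) else p) = p := by
    intro p hp
    obtain ⟨a, b⟩ := p
    split_ifs with he
    · have ha : a = k := by simpa using he
      subst ha
      have h2 := PySem.Dict.get?_of_mem_items d hp hnd
      rw [h] at h2
      injection h2 with h3
      simp [h3]
    · rfl
  calc d.items.map (fun p => if p.1 == k then (k, v) else p)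
      = d.items.map id := List.map_congr_left hid
    _ = d.items := List.map_id d.items

-- one setdefault step, seen through a lookup that falls back to the remaining list
theorem pvOr_setdefault (d : PySem.Dict String String) (p : String × String)
    (t : List (String × String)) (k : String) :
    ((d.setdefault p.2 p.1).get? k).or (pvFirstOld t k)
      = (d.get? k).or (pvFirstOld (p :: t) k) := by
  rw [pvFirstOld_cons]
  by_cases hc : d.contains p.2 = true
  · rw [PySem.Dict.setdefault_of_contains _ _ hc]
    by_cases hk : p.2 = k
    · subst hk
      have hs : (d.get? p.2).isSome := by rw [← PySem.Dict.contains_eq_isSome_get?]; exact hc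
      cases h : d.get? p.2 with
      | none => rw [h] at hs; simp at hs
      | some v => simp [h]
    · simp [hk]
  · have hc' : d.contains p.2 = false := by simpa using hc
    rw [PySem.Dict.setdefault_of_not_contains _ _ hc']
    by_cases hk : k = p.2
    · subst hk
      have hn : d.get? p.2 = none := (PySem.Dict.get?_eq_none_iff_contains d p.2).mpr hc'
      rw [PySem.Dict.get?_insert_self, hn, if_pos rfl]
      simp
    · rw [PySem.Dict.get?_insert_of_ne _ _ hk, if_neg (fun h => hk (Eq.symm h))]

-- lookup in the setdefault-fold dict
theorem pvGet?_setdefault_fold (l : List (String × String)) (d : PySem.Dict String String)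
    (k : String) :
    (l.foldl (fun (d : PySem.Dict String String) p => d.setdefault p.2 p.1) d).get? k
      = (d.get? k).or (pvFirstOld l k) := by
  induction l generalizing d with
  | nil => simp [pvFirstOld]
  | cons p t ih =>
    rw [List.foldl_cons, ih, pvOr_setdefault]

-- B's counting fold is a countP
theorem pvCount_fold (l : List (String × String)) (dF : PySem.Dict String String) (c : Int) :
    l.foldl (fun (c : Int) p => if dF.get? p.2 = some p.1 then c else c + 1) c
      = c + (l.countP (fun p => dF.get? p.2 != some p.1) : Int) := by
  induction l generalizing c with
  | nil => simp
  | cons p t ih =>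
    rw [List.foldl_cons, ih]
    simp only [List.countP_cons]
    by_cases h : dF.get? p.2 = some p.1
    · simp [h]
    · have hb : (dF.get? p.2 != some p.1) = true := by simpa using h
      rw [if_neg h, hb, if_pos rfl]
      push_cast
      ring

-- main invariant: A's one-pass fold equals B's two passes, for any start dict with nodup keys
theorem pvMain (l : List (String × String)) (d : PySem.Dict String String) (c : Int)
    (hnd : d.keys.Nodup) :
    l.foldl
      (fun (st : PySem.Dict String String × Int) p =>
        match st.1.get? p.2 with
        | some v => if v ≠ p.1 then (st.1, st.2 + 1) else (st.1.insert p.2 p.1, st.2)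
        | none => (st.1.insert p.2 p.1, st.2)) (d, c)
      = (l.foldl (fun (d : PySem.Dict String String) p => d.setdefault p.2 p.1) d,
         c + (l.countP (fun p => ((d.get? p.2).or (pvFirstOld l p.2)) != some p.1) : Int)) := by
  induction l generalizing d c with
  | nil => simp
  | cons p t ih =>
    have hcount : t.countP (fun q => (((d.setdefault p.2 p.1).get? q.2).or (pvFirstOld t q.2) != some q.1))
        = t.countP (fun q => ((d.get? q.2).or (pvFirstOld (p :: t) q.2) != some q.1)) :=
      List.countP_congr (fun x _ => by rw [pvOr_setdefault])
    simp only [List.foldl_cons, List.countP_cons]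
    cases hg : d.get? p.2 with
    | none =>
      have hc' : d.contains p.2 = false := (PySem.Dict.get?_eq_none_iff_contains d p.2).mp hg
      have hsd : d.setdefault p.2 p.1 = d.insert p.2 p.1 :=
        PySem.Dict.setdefault_of_not_contains _ _ hc'
      simp only [hg]
      rw [ih (d.insert p.2 p.1) c (PySem.Dict.nodup_keys_insert d p.2 p.1 hnd), ← hsd, hcount]
      simp [pvFirstOld_cons]
    | some v =>
      have hc : d.contains p.2 = true := by
        rw [PySem.Dict.contains_eq_isSome_get?, hg]; rfl
      have hsd : d.setdefault p.2 p.1 = d := PySem.Dict.setdefault_of_contains _ _ hc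
      have hcount' : t.countP (fun q => ((d.get? q.2).or (pvFirstOld t q.2) != some q.1))
          = t.countP (fun q => ((d.get? q.2).or (pvFirstOld (p :: t) q.2) != some q.1)) := by
        have h0 := hcount; rwa [hsd] at h0
      by_cases hv : v = p.1
      · have hins : d.insert p.2 p.1 = d := by
          rw [← hv]; exact pvInsert_eq_self d p.2 v hnd hg
        simp only [if_neg (by simp [hv] : ¬ v ≠ p.1)]
        rw [hins, ih d c hnd, hsd, hcount']
        simp [hv]
      · simp only [if_pos hv]
        rw [ih d (c + 1) hnd, hsd, hcount']
        simp only [Prod.mk.injEq, true_and]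
        have hb : ((some v).or (pvFirstOld (p :: t) p.2) != some p.1) = true := by
          simpa using hv
        rw [hb, if_pos rfl]
        push_cast
        ring

-- ===== VERDICT (by name: the statement is the Claim_ definition above) =====
theorem reverse_mapping_safe_py_spec : Claim_equal_reverse_mapping_safe_py := by
  intro source _
  unfold Spec_reverse_mapping_safe_py
  have hA := pvMain source PySem.Dict.empty 0 PySem.Dict.nodup_keys_empty
  have hB := pvCount_fold source
    (source.foldl (fun (d : PySem.Dict String String) p => d.setdefault p.2 p.1) PySem.Dict.empty) 0
  have hpred : ∀ x ∈ source,
      ((source.foldl (fun (d : PySem.Dict String String) p => d.setdefault p.2 p.1) PySem.Dict.empty).get? x.2 != some x.1)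
        = ((((PySem.Dict.empty : PySem.Dict String String).get? x.2).or (pvFirstOld source x.2)) != some x.1) := by
    intro x _
    rw [pvGet?_setdefault_fold]
  have hc := List.countP_congr
    (p := fun x => (((PySem.Dict.empty : PySem.Dict String String).get? x.2).or (pvFirstOld source x.2) != some x.1))
    (q := fun x => ((source.foldl (fun (d : PySem.Dict String String) p => d.setdefault p.2 p.1) PySem.Dict.empty).get? x.2 != some x.1))
    (l := source)
    (fun x hx => by simp only [hpred x hx])
  simp only [reverse_mapping_safe_py, reverse_mapping_safe_py_alt]
  rw [hA, hB, hc]
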